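-- pv_equiv track=rewrite | github.com/mapramen/competitive | project_euler/triangular_pentagonal_and_hexagonal.py | is_pentagonal_number
-- ===== SOURCE A (Python) =====
-- def is_pentagonal_number(n):
-- 	low, high, ans = 1, n, 1
-- 	while low <= high:
-- 		mid = (low + high) // 2
-- 		pentagon = mid * (3 * mid - 1) // 2
-- 		if pentagon <= n:
-- 			ans = pentagon
-- 			low = mid + 1
-- 		else:
-- 			high = mid - 1
-- 	return ans == n
-- ===== SOURCE B (Python) =====
-- def is_pentagonal_number(n):
--     # Closed-form test: n is pentagonal iff 1+24n is a perfect square whose root s has (1+s) % 6 == 0.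
--     if n < 1:
--         return False
--     d = 1 + 24 * n
--     # integer square root by Newton's iteration (exact, no floats)
--     x = d
--     while x * x > d:
--         x = (x + d // x) // 2
--     return x * x == d and (1 + x) % 6 == 0
-- ===== Notes on version B (the rewrite author's own statement) =====
-- stated objective: alternative
-- what changed: Replaces the binary search over pentagonal values by the closed-form inverse: B tests that twenty-four times n plus one is a perfect square (computed with a hand-written integer Newton square-root loop, no floats) whose root is congruent to five modulo six.
import Mathlib
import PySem

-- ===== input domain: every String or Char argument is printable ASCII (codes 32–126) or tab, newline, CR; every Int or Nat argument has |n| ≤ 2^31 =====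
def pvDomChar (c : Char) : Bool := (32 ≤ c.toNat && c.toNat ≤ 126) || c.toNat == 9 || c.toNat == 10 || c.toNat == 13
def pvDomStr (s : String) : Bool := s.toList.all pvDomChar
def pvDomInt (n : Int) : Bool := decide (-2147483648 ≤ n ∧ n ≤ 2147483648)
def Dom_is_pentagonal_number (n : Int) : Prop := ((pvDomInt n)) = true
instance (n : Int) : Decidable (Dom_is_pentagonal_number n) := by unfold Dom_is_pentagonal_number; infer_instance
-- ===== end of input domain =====

-- B replaces A's binary search with the closed-form pentagonal test (is 1+24n a perfect
-- square, via integer Newton isqrt, with root ≡ 5 mod 6); return values proved equal.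

-- ===== PORT A =====
-- A's while-loop as recursion on the shrinking interval [low, high]
def pentLoop (n low high ans : Int) : Bool :=
  if hlh : low ≤ high then
    let mid := PySem.Int.floordiv (low + high) 2
    let pentagon := PySem.Int.floordiv (mid * (3 * mid - 1)) 2
    if pentagon ≤ n then pentLoop n (mid + 1) high pentagon
    else pentLoop n low (mid - 1) ans
  else ans == n
termination_by (high + 1 - low).toNat
decreasing_by
  · have h := PySem.Int.floordiv_two_mid_bounds hlh
    omega
  · have h := PySem.Int.floordiv_two_mid_bounds hlh
    omega

def is_pentagonal_number (n : Int) : Bool := pentLoop n 1 n 1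

-- ===== PORT B =====
-- termination helper for the Newton loop (cited by its decreasing_by)
theorem newtonStep_lt (d x : Int) (h : x * x > d ∧ 0 < x) :
    (PySem.Int.floordiv (x + PySem.Int.floordiv d x) 2).toNat < x.toNat := by
  obtain ⟨hxx, hx⟩ := h
  have h1 : PySem.Int.floordiv d x * x ≤ d := (PySem.Int.le_floordiv_iff_mul_le hx).mp le_rfl
  have hqx : PySem.Int.floordiv d x < x := by nlinarith
  have h2 : PySem.Int.floordiv (x + PySem.Int.floordiv d x) 2 < x :=
    (PySem.Int.floordiv_lt_iff_lt_mul (by norm_num)).mpr (by omega)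
  omega

-- B's Newton isqrt loop; the '0 < x' conjunct is only a totality guard: it holds on
-- every state the initial call (x = d ≥ 25) can reach, so the Python semantics agree.
def newtonLoop (d x : Int) : Int :=
  if h : x * x > d ∧ 0 < x then
    newtonLoop d (PySem.Int.floordiv (x + PySem.Int.floordiv d x) 2)
  else x
termination_by x.toNat
decreasing_by exact newtonStep_lt d x h

def is_pentagonal_number_alt (n : Int) : Bool :=
  if n < 1 then false
  else
    let d := 1 + 24 * n
    let x := newtonLoop d d
    x * x == d && PySem.Int.mod (1 + x) 6 == 0

-- ===== PRECONDITION & SPEC =====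
def Spec_is_pentagonal_number (n : Int) (out : Bool) : Prop := out = is_pentagonal_number_alt n
instance (n : Int) (out : Bool) : Decidable (Spec_is_pentagonal_number n out) := by unfold Spec_is_pentagonal_number; infer_instance

-- ===== CLAIM (what is proved, stated in full; the proofs are below) =====
def Claim_equal_is_pentagonal_number : Prop := ∀ (n : Int), Dom_is_pentagonal_number n → Spec_is_pentagonal_number n (is_pentagonal_number n)

-- ===== LEMMAS AND PROOFS =====

-- the pentagonal-number expression computed in A's loop body
def pentP (m : Int) : Int := PySem.Int.floordiv (m * (3 * m - 1)) 2

theorem fd_two_exact (k : Int) : PySem.Int.floordiv (2 * k) 2 = k := by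
  rw [PySem.Int.floordiv_eq_ediv_of_pos (by norm_num)]
  omega

theorem pentP_two (m : Int) : 2 * pentP m = m * (3 * m - 1) := by
  rcases Int.even_or_odd m with ⟨t, ht⟩ | ⟨t, ht⟩
  · have h : m * (3 * m - 1) = 2 * (t * (3 * m - 1)) := by rw [ht]; ring
    rw [pentP, h, fd_two_exact, ← h]
  · have h : m * (3 * m - 1) = 2 * (m * (3 * t + 1)) := by rw [ht]; ring
    rw [pentP, h, fd_two_exact, ← h]

theorem pentP_mono {a b : Int} (ha : 1 ≤ a) (hab : a ≤ b) : pentP a ≤ pentP b := by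
  have h2 : a * (3 * a - 1) ≤ b * (3 * b - 1) := by nlinarith
  have ha2 := pentP_two a
  have hb2 := pentP_two b
  omega

-- loop invariant: ans = pentP k for some 1 ≤ k ≤ low, and the loop answers whether
-- ans already equals n or some pentagonal index in [low, high] hits n
theorem pentLoop_char : ∀ (t : Nat) (n low high ans k : Int),
    (high + 1 - low).toNat ≤ t → 1 ≤ k → k ≤ low → ans = pentP k →
    (pentLoop n low high ans = true ↔ ans = n ∨ ∃ m, low ≤ m ∧ m ≤ high ∧ pentP m = n) := by
  intro t
  induction t with
  | zero =>
    intro n low high ans k hm hk hkl hans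
    have hlh : ¬ low ≤ high := by omega
    rw [pentLoop]
    simp only [hlh, dite_false, beq_iff_eq]
    constructor
    · exact Or.inl
    · rintro (h | ⟨m, h1, h2, _⟩)
      · exact h
      · omega
  | succ t ih =>
    intro n low high ans k hm hk hkl hans
    rw [pentLoop]
    by_cases hlh : low ≤ high
    · simp only [hlh, dite_true]
      have hmid := PySem.Int.floordiv_two_mid_bounds hlh
      set mid := PySem.Int.floordiv (low + high) 2 with hmiddef
      have hmid1 : (1 : Int) ≤ mid := by omega
      by_cases hp : PySem.Int.floordiv (mid * (3 * mid - 1)) 2 ≤ n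
      · have hp' : pentP mid ≤ n := hp
        rw [if_pos hp,
          ih n (mid + 1) high (PySem.Int.floordiv (mid * (3 * mid - 1)) 2) mid
            (by omega) hmid1 (by omega) rfl]
        constructor
        · rintro (h | ⟨m, h1, h2, h3⟩)
          · exact Or.inr ⟨mid, by omega, by omega, h⟩
          · exact Or.inr ⟨m, by omega, h2, h3⟩
        · rintro (h | ⟨m, h1, h2, h3⟩)
          · have hle : pentP k ≤ pentP mid := pentP_mono hk (by omega)
            have hk2 : pentP k = n := by omega
            exact Or.inl (le_antisymm hp' (hk2 ▸ hle))
          · by_cases hmm : m ≤ mid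
            · have hle : pentP m ≤ pentP mid := pentP_mono (by omega) hmm
              exact Or.inl (le_antisymm hp' (h3 ▸ hle))
            · exact Or.inr ⟨m, by omega, h2, h3⟩
      · rw [if_neg hp, ih n low (mid - 1) ans k (by omega) hk hkl hans]
        have hp' : ¬ pentP mid ≤ n := hp
        constructor
        · rintro (h | ⟨m, h1, h2, h3⟩)
          · exact Or.inl h
          · exact Or.inr ⟨m, h1, by omega, h3⟩
        · rintro (h | ⟨m, h1, h2, h3⟩)
          · exact Or.inl h
          · by_cases hmm : m ≤ mid - 1
            · exact Or.inr ⟨m, h1, hmm, h3⟩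
            · have hle : pentP mid ≤ pentP m := pentP_mono hmid1 (by omega)
              exact absurd (h3 ▸ hle) hp'
    · simp only [hlh, dite_false, beq_iff_eq]
      constructor
      · exact Or.inl
      · rintro (h | ⟨m, h1, h2, _⟩)
        · exact h
        · omega

theorem a_char (n : Int) (hn : 1 ≤ n) :
    (is_pentagonal_number n = true ↔ ∃ m, 1 ≤ m ∧ m ≤ n ∧ pentP m = n) := by
  have hP1 : (1 : Int) = pentP 1 := by
    have h := pentP_two 1
    omega
  rw [is_pentagonal_number, pentLoop_char (n + 1 - 1).toNat n 1 n 1 1 (by omega) le_rfl le_rfl hP1]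
  constructor
  · rintro (h | h)
    · exact ⟨1, le_rfl, hn, by omega⟩
    · exact h
  · exact Or.inr

-- Newton loop invariant: from any nonnegative x with d < (x+1)², the loop returns
-- the integer square root of d (characterised by its bracketing property)
theorem newtonLoop_spec : ∀ (t : Nat) (d x : Int), x.toNat ≤ t → 0 ≤ d → 0 ≤ x →
    d < (x + 1) * (x + 1) →
    (0 ≤ newtonLoop d x ∧ newtonLoop d x * newtonLoop d x ≤ d ∧
      d < (newtonLoop d x + 1) * (newtonLoop d x + 1)) := by
  intro t
  induction t with
  | zero =>
    intro d x ht hd hx hub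
    have hx0 : x = 0 := by omega
    rw [newtonLoop, dif_neg (by omega : ¬ (x * x > d ∧ 0 < x))]
    refine ⟨hx, ?_, hub⟩
    subst hx0
    simpa using hd
  | succ t ih =>
    intro d x ht hd hx hub
    rw [newtonLoop]
    by_cases h : x * x > d ∧ 0 < x
    · rw [dif_pos h]
      obtain ⟨hxx, hxpos⟩ := h
      have h1 : PySem.Int.floordiv d x * x ≤ d := (PySem.Int.le_floordiv_iff_mul_le hxpos).mp le_rfl
      have h2 : d < (PySem.Int.floordiv d x + 1) * x :=
        (PySem.Int.floordiv_lt_iff_lt_mul hxpos).mp (by omega)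
      have hq0 : 0 ≤ PySem.Int.floordiv d x := by nlinarith
      set q := PySem.Int.floordiv d x with hq
      have h3 : PySem.Int.floordiv (x + q) 2 * 2 ≤ x + q :=
        (PySem.Int.le_floordiv_iff_mul_le (b := 2) (by norm_num)).mp le_rfl
      have h4 : x + q < (PySem.Int.floordiv (x + q) 2 + 1) * 2 :=
        (PySem.Int.floordiv_lt_iff_lt_mul (b := 2) (by norm_num)).mp (by omega)
      set x' := PySem.Int.floordiv (x + q) 2 with hx'
      have hx'0 : 0 ≤ x' := by omega
      have hub' : d < (x' + 1) * (x' + 1) := by nlinarith [sq_nonneg (x' + 1 - x)]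
      have hlt : x'.toNat < x.toNat := newtonStep_lt d x ⟨hxx, hxpos⟩
      exact ih d x' (by omega) hd hx'0 hub'
    · rw [dif_neg h]
      refine ⟨hx, ?_, hub⟩
      rcases not_and_or.mp h with h' | h'
      · exact not_lt.mp h'
      · have hx0 : x = 0 := by omega
        subst hx0
        simpa using hd

-- bridge: a pentagonal witness exists iff 1+24n is the square of the Newton root
-- and that root is ≡ 5 mod 6
theorem main_iff (n : Int) (hn : 1 ≤ n) :
    ((∃ m, 1 ≤ m ∧ m ≤ n ∧ pentP m = n) ↔
      (newtonLoop (1 + 24 * n) (1 + 24 * n) * newtonLoop (1 + 24 * n) (1 + 24 * n) = 1 + 24 * n ∧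
        PySem.Int.mod (1 + newtonLoop (1 + 24 * n) (1 + 24 * n)) 6 = 0)) := by
  set d : Int := 1 + 24 * n with hd
  have hd25 : (25 : Int) ≤ d := by omega
  obtain ⟨hy0, hy1, hy2⟩ :=
    newtonLoop_spec d.toNat d d (by omega) (by omega) (by omega) (by nlinarith)
  set y := newtonLoop d d with hy
  have hmod : PySem.Int.mod (1 + y) 6 = (1 + y) % 6 :=
    PySem.Int.mod_eq_emod_of_pos (by norm_num)
  constructor
  · rintro ⟨m, hm1, hmn, hpm⟩
    have h2n : m * (3 * m - 1) = 2 * n := by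
      have h := pentP_two m
      omega
    have hsq : (6 * m - 1) * (6 * m - 1) = d := by rw [hd]; linear_combination 12 * h2n
    have hlo : 6 * m - 1 ≤ y := by nlinarith
    have hhi : y < 6 * m := by nlinarith
    have hym : y = 6 * m - 1 := by omega
    refine ⟨by rw [hym, hsq], ?_⟩
    rw [hmod, hym]
    omega
  · rintro ⟨hsq, hm6⟩
    rw [hmod] at hm6
    have hy5 : (5 : Int) ≤ y := by nlinarith
    obtain ⟨m, hm⟩ : ∃ m, 1 + y = 6 * m := ⟨(1 + y) / 6, by omega⟩
    have hm1 : (1 : Int) ≤ m := by omega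
    have h2n : m * (3 * m - 1) = 2 * n := by nlinarith [hsq, hm, hd]
    have hpm : pentP m = n := by
      have h := pentP_two m
      omega
    have hmn : m ≤ n := by nlinarith
    exact ⟨m, hm1, hmn, hpm⟩

-- ===== VERDICT (by name: the statement is the Claim_ definition above) =====
theorem is_pentagonal_number_spec : Claim_equal_is_pentagonal_number := by
  intro n _
  unfold Spec_is_pentagonal_number
  by_cases hn : n < 1
  · rw [is_pentagonal_number, pentLoop, is_pentagonal_number_alt, if_pos hn]
    have h1 : ¬ (1 : Int) ≤ n := by omega
    have h2 : (1 : Int) ≠ n := by omega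
    simp [h1, h2]
  · rw [not_lt] at hn
    rw [is_pentagonal_number_alt, if_neg (by omega : ¬ n < 1)]
    rw [Bool.eq_iff_iff]
    simp only [Bool.and_eq_true, beq_iff_eq]
    exact (a_char n hn).trans (main_iff n hn)
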